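-- pv_equiv track=rewrite | github.com/sarabizjak7/Bioinformatics | HW4  - genome assembly/helper_functions.py | choose_starting_node
-- ===== SOURCE A (Python) =====
-- def choose_starting_node(graph):
--     counter = {edge: 0 for edge in graph}
--     for edge1 in graph:
--         for edge2 in graph:
--             for conn in graph[edge2]:
--                 if edge1 in conn:
--                     counter[edge1] += 1
--     for edge in counter:
--         if counter[edge] == 0:
--             starting_node = edge
--             starting_seq = None
--             break
--         else:
--             starting_node = list(graph.keys())[0]
--             starting_seq = list(graph.values())[0][0][1]
--
--     return starting_node, starting_seq
-- ===== SOURCE B (Python) =====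
-- def choose_starting_node(graph):
--     # one pass over all connections tallying, per node, how many connections contain it
--     cnt = {}
--     for conns in graph.values():
--         for conn in conns:
--             for x in set(conn):
--                 cnt[x] = cnt.get(x, 0) + 1
--     for k in graph:
--         if cnt.get(k, 0) == 0:
--             return k, None
--     first = next(iter(graph))
--     return first, graph[first][0][1]
-- ===== Notes on version B (the rewrite author's own statement) =====
-- stated objective: faster
-- what changed: A rescans every connection list once per node (for each node, a full pass over all lists to count the connections containing it); B makes a single tallying pass over all connections into a dictionary of counts and then selects the first zero-count node in one linear scan.
-- outside the precondition, e.g. on choose_starting_node({}): A raises UnboundLocalError, B raises StopIteration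
import Mathlib
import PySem

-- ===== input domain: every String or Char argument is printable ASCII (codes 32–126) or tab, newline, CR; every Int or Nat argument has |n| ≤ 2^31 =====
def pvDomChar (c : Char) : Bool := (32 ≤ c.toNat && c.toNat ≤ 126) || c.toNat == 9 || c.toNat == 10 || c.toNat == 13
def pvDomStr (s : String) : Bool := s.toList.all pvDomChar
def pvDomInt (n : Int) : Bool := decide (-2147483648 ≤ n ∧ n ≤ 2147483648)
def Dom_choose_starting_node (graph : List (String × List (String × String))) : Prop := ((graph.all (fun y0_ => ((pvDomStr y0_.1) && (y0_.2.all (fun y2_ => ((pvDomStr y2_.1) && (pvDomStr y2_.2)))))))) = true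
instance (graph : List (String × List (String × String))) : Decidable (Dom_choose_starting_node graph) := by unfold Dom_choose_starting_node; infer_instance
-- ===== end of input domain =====

-- B replaces A's per-node rescans of every connection list (quadratic in the number of
-- nodes) by one tallying pass over all connections followed by a linear selection scan.

-- ===== PORT A =====
-- the final 'for edge in counter: … break …' loop of A, with the loop variables
-- (starting_node, starting_seq) carried as the accumulator `acc`
def pvSelectA (counter : PySem.Dict String Int)
    (d : PySem.Dict String (List (String × String))) :
    List String → String × Option String → String × Option String
  | [], acc => acc
  | k :: rest, _ =>
      if counter.getD k 0 == 0 then (k, none)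
      else pvSelectA counter d rest
        (PySem.List.pyGetD d.keys 0 "",
         some (PySem.List.pyGetD (PySem.List.pyGetD d.values 0 []) 0 ("", "")).2)

def choose_starting_node (graph : List (String × List (String × String))) : String × Option String :=
  let d := PySem.Dict.ofList graph
  -- counter = {edge: 0 for edge in graph}
  let counter0 : PySem.Dict String Int := d.keys.foldl (fun c e => c.insert e 0) PySem.Dict.empty
  -- triple loop: for edge1 in graph: for edge2 in graph: for conn in graph[edge2]: …
  let counter := d.keys.foldl (fun c e1 =>
      d.keys.foldl (fun c e2 =>
        (d.getD e2 []).foldl (fun c conn =>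
          if e1 == conn.1 || e1 == conn.2 then c.modify e1 0 (· + 1) else c) c) c) counter0
  -- final selection loop; acc ("", none) stands for the unbound variables (outside Pre_)
  pvSelectA counter d d.keys ("", none)

-- ===== PORT B =====
def choose_starting_node_alt (graph : List (String × List (String × String))) : String × Option String :=
  let d := PySem.Dict.ofList graph
  -- one pass: for conns in graph.values(): for conn in conns: for x in set(conn): cnt[x] = cnt.get(x,0)+1
  let cnt : PySem.Dict String Int := d.values.foldl (fun c conns =>
      conns.foldl (fun c conn =>
        (PySem.Set.ofList [conn.1, conn.2]).foldl (fun c x => c.insert x (c.getD x 0 + 1)) c) c)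
    PySem.Dict.empty
  -- first key with no connection containing it, else the first key with its first sequence
  match d.keys.find? (fun k => cnt.getD k 0 == 0) with
  | some k => (k, none)
  | none =>
      match d.keys with
      | [] => ("", none)   -- Python raises StopIteration here; outside Pre_
      | k0 :: _ => (k0, some (PySem.List.pyGetD (d.getD k0 []) 0 ("", "")).2)

-- ===== PRECONDITION & SPEC =====
-- Pre_ excludes exactly the inputs where Python A raises: the empty dict (UnboundLocalError),
-- and dicts whose first value list is empty while the first key occurs in some connection
-- (IndexError on list(graph.values())[0][0]).
def Pre_choose_starting_node (graph : List (String × List (String × String))) : Prop :=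
  let d := PySem.Dict.ofList graph
  d.items ≠ [] ∧
    ((∀ conn ∈ d.values.flatten,
        (d.items.headD ("", [])).1 ≠ conn.1 ∧ (d.items.headD ("", [])).1 ≠ conn.2)
      ∨ (d.items.headD ("", [])).2 ≠ [])
instance (graph : List (String × List (String × String))) : Decidable (Pre_choose_starting_node graph) := by unfold Pre_choose_starting_node; infer_instance

def pvWitness_choose_starting_node : (List (String × List (String × String))) :=
  [("a", [("b", "x")])]

def Spec_choose_starting_node (graph : List (String × List (String × String))) (out : String × Option String) : Prop := out = choose_starting_node_alt graph
instance (graph : List (String × List (String × String))) (out : String × Option String) : Decidable (Spec_choose_starting_node graph out) := by unfold Spec_choose_starting_node; infer_instance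

-- ===== CLAIM (what is proved, stated in full; the proofs are below) =====
def Claim_equal_choose_starting_node : Prop := ∀ (graph : List (String × List (String × String))), Dom_choose_starting_node graph → Pre_choose_starting_node graph → Spec_choose_starting_node graph (choose_starting_node graph)

-- ===== LEMMAS AND PROOFS =====

-- the connection-membership predicate 'k in conn'
def pvHas (k : String) (conn : String × String) : Bool := k == conn.1 || k == conn.2

-- a two-element Python set counts an element once iff the element is one of the two
theorem pvSet_pair_count (conn : String × String) (k : String) :
    ((PySem.Set.ofList [conn.1, conn.2]).count k : Int) = if pvHas k conn then 1 else 0 := by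
  obtain ⟨a, b⟩ := conn
  have : (PySem.Set.ofList [a, b]).count k = if pvHas k (a, b) then 1 else 0 := by
    by_cases h : a = b <;> simp [pvHas, PySem.Set.ofList, PySem.Set.add, PySem.Set.contains, h] <;>
      by_cases h1 : k = a <;> by_cases h2 : k = b <;> simp_all [eq_comm]
  rw [this]; split_ifs <;> simp

-- B's innermost loop over set(conn): via PySem.Dict.getD_foldl_insert_add_one and pvSet_pair_count
theorem pvB_conn (c : PySem.Dict String Int) (conn : String × String) (k : String) :
    ((PySem.Set.ofList [conn.1, conn.2]).foldl (fun c x => c.insert x (c.getD x 0 + 1)) c).getD k 0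
      = c.getD k 0 + if pvHas k conn then 1 else 0 := by
  rw [PySem.Dict.getD_foldl_insert_add_one, pvSet_pair_count conn k]

-- B's loop over one connection list
theorem pvB_conns (conns : List (String × String)) (c : PySem.Dict String Int) (k : String) :
    (conns.foldl (fun c conn =>
        (PySem.Set.ofList [conn.1, conn.2]).foldl (fun c x => c.insert x (c.getD x 0 + 1)) c) c).getD k 0
      = c.getD k 0 + conns.countP (pvHas k) := by
  induction conns generalizing c with
  | nil => simp
  | cons conn rest ih =>
      simp only [List.foldl_cons, ih, pvB_conn, List.countP_cons]
      split_ifs <;> push_cast <;> ring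

-- B's whole counting pass
theorem pvB_count (vals : List (List (String × String))) (c : PySem.Dict String Int) (k : String) :
    (vals.foldl (fun c conns =>
        conns.foldl (fun c conn =>
          (PySem.Set.ofList [conn.1, conn.2]).foldl (fun c x => c.insert x (c.getD x 0 + 1)) c) c) c).getD k 0
      = c.getD k 0 + vals.flatten.countP (pvHas k) := by
  induction vals generalizing c with
  | nil => simp
  | cons conns rest ih =>
      simp only [List.foldl_cons, ih, pvB_conns, List.flatten_cons, List.countP_append]
      push_cast; ring

-- A's innermost loop (conditional modify at the fixed key e1)
theorem pvA_conns (e1 : String) (conns : List (String × String)) (c : PySem.Dict String Int) (k : String) :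
    (conns.foldl (fun c conn =>
        if e1 == conn.1 || e1 == conn.2 then c.modify e1 0 (· + 1) else c) c).getD k 0
      = c.getD k 0 + if k = e1 then (conns.countP (pvHas e1) : Int) else 0 := by
  induction conns generalizing c with
  | nil => simp
  | cons conn rest ih =>
      simp only [List.foldl_cons, List.countP_cons]
      by_cases hc : (e1 == conn.1 || e1 == conn.2) = true
      · simp only [hc, if_true, ih, PySem.Dict.getD_modify]
        have hp : pvHas e1 conn = true := hc
        by_cases hk : k = e1
        · subst hk; rw [hp]; simp; ring
        · simp [hk]
      · have hp : pvHas e1 conn = false := by simpa [pvHas] using hc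
        rw [if_neg hc, ih, hp]
        simp

-- A's middle loop over edge2
theorem pvA_e2 (d : PySem.Dict String (List (String × String))) (e1 : String)
    (ks : List String) (c : PySem.Dict String Int) (k : String) :
    (ks.foldl (fun c e2 =>
        (d.getD e2 []).foldl (fun c conn =>
          if e1 == conn.1 || e1 == conn.2 then c.modify e1 0 (· + 1) else c) c) c).getD k 0
      = c.getD k 0 + if k = e1 then ((ks.map (fun e2 => d.getD e2 [])).flatten.countP (pvHas e1) : Int) else 0 := by
  induction ks generalizing c with
  | nil => simp
  | cons e2 rest ih =>
      simp only [List.foldl_cons, ih, pvA_conns, List.map_cons, List.flatten_cons, List.countP_append]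
      split_ifs <;> push_cast <;> ring

-- A's outer loop over edge1
theorem pvA_e1 (d : PySem.Dict String (List (String × String)))
    (ks : List String) (c : PySem.Dict String Int) (k : String) :
    (ks.foldl (fun c e1 =>
        d.keys.foldl (fun c e2 =>
          (d.getD e2 []).foldl (fun c conn =>
            if e1 == conn.1 || e1 == conn.2 then c.modify e1 0 (· + 1) else c) c) c) c).getD k 0
      = c.getD k 0 + (ks.count k : Int) * ((d.keys.map (fun e2 => d.getD e2 [])).flatten.countP (pvHas k) : Int) := by
  induction ks generalizing c with
  | nil => simp
  | cons e1 rest ih =>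
      simp only [List.foldl_cons, ih, pvA_e2, List.count_cons]
      by_cases hk : k = e1
      · subst hk; simp; ring
      · have h2 : (e1 == k) = false := by simp; exact fun h => hk h.symm
        simp [hk, h2]

-- the zero-initialisation loop
theorem pvA_init (ks : List String) (c : PySem.Dict String Int) (k : String) :
    (ks.foldl (fun c e => c.insert e (0 : Int)) c).getD k 0
      = if k ∈ ks then 0 else c.getD k 0 := by
  induction ks generalizing c with
  | nil => simp
  | cons e rest ih =>
      simp only [List.foldl_cons, ih, PySem.Dict.getD_insert, List.mem_cons]
      by_cases h : k ∈ rest <;> by_cases h2 : k = e <;> simp [h, h2]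

-- A's selection loop in closed form
theorem pvSelectA_eq (counter : PySem.Dict String Int)
    (d : PySem.Dict String (List (String × String))) (ks : List String) (acc : String × Option String) :
    pvSelectA counter d ks acc
      = match ks.find? (fun k => counter.getD k 0 == 0) with
        | some k => (k, none)
        | none => if ks.isEmpty then acc else
            (PySem.List.pyGetD d.keys 0 "",
             some (PySem.List.pyGetD (PySem.List.pyGetD d.values 0 []) 0 ("", "")).2) := by
  induction ks generalizing acc with
  | nil => rfl
  | cons k rest ih =>
      simp only [pvSelectA, List.find?]
      by_cases h : counter.getD k 0 == 0
      · simp [h]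
      · simp only [Bool.not_eq_true] at h
        simp only [h, Bool.false_eq_true, if_false, ih]
        cases hf : rest.find? (fun k => counter.getD k 0 == 0) with
        | some _ => rfl
        | none => cases rest <;> simp

-- find? with pointwise-equal predicates
theorem pvFind_congr (l : List String) (p q : String → Bool) (h : ∀ a ∈ l, p a = q a) :
    l.find? p = l.find? q := by
  induction l with
  | nil => rfl
  | cons x xs ih =>
      simp only [List.find?, h x (by simp)]
      cases q x
      · exact ih (fun a ha => h a (by simp [ha]))
      · rfl


-- the two functions agree on every input (the ports are total; Pre_ marks where Python A returns)
theorem pv_main (graph : List (String × List (String × String))) :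
    choose_starting_node graph = choose_starting_node_alt graph := by
  simp only [choose_starting_node, choose_starting_node_alt]
  set d := PySem.Dict.ofList graph with hd
  have hnd : d.keys.Nodup := PySem.Dict.nodup_keys_ofList graph
  have hvals : d.values = d.keys.map (fun k => d.getD k []) := PySem.Dict.values_eq_map_keys d hnd []
  rw [pvSelectA_eq]
  have hpred : ∀ k ∈ d.keys,
      ((d.keys.foldl (fun c e1 =>
          d.keys.foldl (fun c e2 =>
            (d.getD e2 []).foldl (fun c conn =>
              if e1 == conn.1 || e1 == conn.2 then c.modify e1 0 (· + 1) else c) c) c)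
        (d.keys.foldl (fun c e => c.insert e 0) (PySem.Dict.empty : PySem.Dict String Int))).getD k 0 == 0)
      = ((d.values.foldl (fun c conns =>
          conns.foldl (fun c conn =>
            (PySem.Set.ofList [conn.1, conn.2]).foldl (fun c x => c.insert x (c.getD x 0 + 1)) c) c)
        (PySem.Dict.empty : PySem.Dict String Int)).getD k 0 == 0) := by
    intro k hk
    rw [pvA_e1, pvA_init, pvB_count, List.count_eq_one_of_mem hnd hk]
    simp [hk, hvals]
  rw [pvFind_congr d.keys _ _ hpred]
  cases hf : d.keys.find? (fun k =>
      ((d.values.foldl (fun c conns =>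
          conns.foldl (fun c conn =>
            (PySem.Set.ofList [conn.1, conn.2]).foldl (fun c x => c.insert x (c.getD x 0 + 1)) c) c)
        (PySem.Dict.empty : PySem.Dict String Int)).getD k 0) == 0) with
  | some k => simp
  | none =>
      cases hk : d.keys with
      | nil => simp
      | cons k0 rest =>
          simp only [List.isEmpty_cons, Bool.false_eq_true, if_false]
          have hv0 : d.values = (d.getD k0 []) :: rest.map (fun k => d.getD k []) := by
            rw [hvals, hk]; rfl
          rw [hv0]
          simp [PySem.List.pyGetD_zero_cons]

-- ===== VERDICT (by name: the statement is the Claim_ definition above) =====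
theorem choose_starting_node_spec : Claim_equal_choose_starting_node := by
  intro graph _ _
  unfold Spec_choose_starting_node
  exact pv_main graph
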